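-- pv_equiv track=rewrite | github.com/Maurdekye/Misc-Projects | Python/CMD scripts/memetext.py | crossdiamond
-- ===== SOURCE A (Python) =====
-- def spaceout(text):
--     return " ".join(list(text.upper()))
--
-- def crossdiamond(text):
--     f = ""
--     text = text.upper()
--     text = text[-1] + text[:-1]
--     for i, _ in enumerate(text):
--         f += spaceout(text[:i]) + "\n"
--         text = text[1:] + text[0]
--     for i, _ in enumerate(text):
--         spc = (2 * i) * " "
--         f += spc + spaceout(text[i:]) + "\n"
--         text = text[1:] + text[0]
--     return f
-- ===== SOURCE B (Python) =====
-- def spaceout(text):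
--     return " ".join(list(text.upper()))
--
-- def crossdiamond(text):
--     t = text.upper()
--     t = t[-1] + t[:-1]
--     d = t + t
--     n = len(t)
--     lines = [spaceout(d[i:2 * i]) for i in range(n)]
--     lines += [2 * i * " " + spaceout(d[2 * i:n + i]) for i in range(n)]
--     return "".join(line + "\n" for line in lines)
-- ===== Notes on version B (the rewrite author's own statement) =====
-- stated objective: alternative
-- what changed: B drops A's mutating rotate-string-each-iteration accumulator and instead precomputes the doubled rotated string once, reading each output line directly by index slicing, building the result with comprehensions and a single join.
import Mathlib
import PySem

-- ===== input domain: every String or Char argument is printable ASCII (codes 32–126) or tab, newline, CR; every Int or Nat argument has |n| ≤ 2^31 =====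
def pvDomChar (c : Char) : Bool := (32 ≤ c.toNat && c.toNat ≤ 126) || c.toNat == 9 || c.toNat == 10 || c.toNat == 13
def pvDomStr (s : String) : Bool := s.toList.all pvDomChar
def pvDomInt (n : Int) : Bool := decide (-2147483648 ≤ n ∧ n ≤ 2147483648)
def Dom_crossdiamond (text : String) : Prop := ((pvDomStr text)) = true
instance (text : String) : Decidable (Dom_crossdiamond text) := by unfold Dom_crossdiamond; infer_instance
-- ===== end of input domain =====

-- B replaces A's two stateful string-rotation loops by direct slicing of the doubled
-- string (alternative decomposition; no speed claim).

-- ===== PORT A =====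
-- spaceout(text) = " ".join(list(text.upper()))
def pvSpaceout (cs : List Char) : List Char :=
  PySem.Chars.join [' '] ((PySem.Chars.upper cs).map (fun c => [c]))

-- text[1:] + text[0]; exact for nonempty text (Python raises on "", excluded by Pre_)
def pvRot1 (l : List Char) : List Char := l.drop 1 ++ l.take 1

def crossdiamond (text : String) : String :=
  -- text = text.upper(); text = text[-1] + text[:-1]  (exact for nonempty text; Pre_ excludes "")
  let t0 : List Char :=
    (PySem.Chars.upper text.toList).getLast?.getD ' ' ::
      (PySem.Chars.upper text.toList).dropLast
  -- for i, _ in enumerate(text): f += spaceout(text[:i]) + "\n"; text = text[1:] + text[0]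
  let s1 := (List.range t0.length).foldl
    (fun (st : List Char × List Char) i =>
      (st.1 ++ pvSpaceout (st.2.take i) ++ ['\n'], pvRot1 st.2)) ([], t0)
  -- for i, _ in enumerate(text): f += 2*i*" " + spaceout(text[i:]) + "\n"; text = text[1:] + text[0]
  let s2 := (List.range t0.length).foldl
    (fun (st : List Char × List Char) i =>
      (st.1 ++ List.replicate (2 * i) ' ' ++ pvSpaceout (st.2.drop i) ++ ['\n'], pvRot1 st.2)) s1
  String.mk s2.1

-- ===== PORT B =====
def crossdiamond_alt (text : String) : String :=
  let t : List Char :=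
    (PySem.Chars.upper text.toList).getLast?.getD ' ' ::
      (PySem.Chars.upper text.toList).dropLast
  let d := t ++ t
  let n := t.length
  let lines :=
    (List.range n).map (fun i => pvSpaceout ((d.drop i).take i)) ++
    (List.range n).map (fun i =>
      List.replicate (2 * i) ' ' ++ pvSpaceout ((d.drop (2 * i)).take (n - i)))
  String.mk ((lines.map (· ++ ['\n'])).flatten)

-- ===== PRECONDITION & SPEC =====
-- Pre_ excludes only the empty string, on which A (and B) raise IndexError at text[-1].
def Pre_crossdiamond (text : String) : Prop := text ≠ ""
instance (text : String) : Decidable (Pre_crossdiamond text) := by unfold Pre_crossdiamond; infer_instance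
def pvWitness_crossdiamond : String := "ab"

def Spec_crossdiamond (text : String) (out : String) : Prop := out = crossdiamond_alt text
instance (text : String) (out : String) : Decidable (Spec_crossdiamond text out) := by unfold Spec_crossdiamond; infer_instance

-- ===== CLAIM (what is proved, stated in full; the proofs are below) =====
def Claim_equal_crossdiamond : Prop := ∀ (text : String), Dom_crossdiamond text → Pre_crossdiamond text → Spec_crossdiamond text (crossdiamond text)

-- ===== LEMMAS AND PROOFS =====

theorem pvRot1_eq_rotate (l : List Char) : pvRot1 l = l.rotate 1 := by
  cases l with
  | nil => rfl
  | cons a as =>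
    rw [List.rotate_eq_drop_append_take (by simp)]
    rfl

-- slice characterisation of an i-fold left rotation
theorem rotate_take (t : List Char) (i : Nat) (hi : i ≤ t.length) :
    (t.rotate i).take i = ((t ++ t).drop i).take i := by
  rcases Nat.eq_zero_or_pos t.length with h0 | hpos
  · simp [List.eq_nil_of_length_eq_zero h0]
  apply List.ext_getElem
  · simp; omega
  · intro j h1 h2
    simp only [List.getElem_take, List.getElem_rotate, List.getElem_drop, List.getElem_append]
    simp only [List.length_take, List.length_rotate] at h1
    by_cases h : i + j < t.length
    · have e : (j + i) % t.length = i + j := by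
        rw [Nat.mod_eq_of_lt (by omega)]; omega
      simp [e, h]
    · have e : (j + i) % t.length = i + j - t.length := by
        rw [Nat.mod_eq_sub_mod (by omega), Nat.mod_eq_of_lt (by omega)]; omega
      simp [e, h]

theorem rotate_drop (t : List Char) (i : Nat) (hi : i ≤ t.length) :
    (t.rotate i).drop i = ((t ++ t).drop (2 * i)).take (t.length - i) := by
  rcases Nat.eq_zero_or_pos t.length with h0 | hpos
  · simp [List.eq_nil_of_length_eq_zero h0]
  apply List.ext_getElem
  · simp; omega
  · intro j h1 h2
    simp only [List.getElem_drop, List.getElem_take, List.getElem_rotate, List.getElem_append]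
    simp only [List.length_drop, List.length_rotate] at h1
    by_cases h : 2 * i + j < t.length
    · have e : (i + j + i) % t.length = 2 * i + j := by
        rw [Nat.mod_eq_of_lt (by omega)]; try omega
      simp [e, h]
    · have e : (i + j + i) % t.length = 2 * i + j - t.length := by
        rw [show i + j + i = 2 * i + j by omega, Nat.mod_eq_sub_mod (by omega),
          Nat.mod_eq_of_lt (by omega)]; try omega
      simp [e, h]

-- invariant of A's first loop
theorem loop1_inv (t : List Char) (k : Nat) :
    (List.range k).foldl
      (fun (st : List Char × List Char) i =>
        (st.1 ++ pvSpaceout (st.2.take i) ++ ['\n'], pvRot1 st.2)) ([], t)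
    = (((List.range k).map (fun i => pvSpaceout ((t.rotate i).take i) ++ ['\n'])).flatten,
       t.rotate k) := by
  induction k with
  | zero => simp
  | succ k ih =>
    rw [List.range_succ, List.foldl_append, ih]
    simp [pvRot1_eq_rotate, List.rotate_rotate]

-- invariant of A's second loop
theorem loop2_inv (t : List Char) (acc : List Char) (k : Nat) :
    (List.range k).foldl
      (fun (st : List Char × List Char) i =>
        (st.1 ++ List.replicate (2 * i) ' ' ++ pvSpaceout (st.2.drop i) ++ ['\n'], pvRot1 st.2))
      (acc, t)
    = (acc ++ ((List.range k).map
        (fun i => List.replicate (2 * i) ' ' ++ pvSpaceout ((t.rotate i).drop i) ++ ['\n'])).flatten,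
       t.rotate k) := by
  induction k with
  | zero => simp
  | succ k ih =>
    rw [List.range_succ, List.foldl_append, ih]
    simp [pvRot1_eq_rotate, List.rotate_rotate]

-- ===== VERDICT (by name: the statement is the Claim_ definition above) =====
theorem crossdiamond_spec : Claim_equal_crossdiamond := by
  intro text _ _
  unfold Spec_crossdiamond crossdiamond crossdiamond_alt
  set t : List Char :=
    (PySem.Chars.upper text.toList).getLast?.getD ' ' ::
      (PySem.Chars.upper text.toList).dropLast with ht
  dsimp only []
  rw [loop1_inv, List.rotate_length, loop2_inv, List.rotate_length]
  simp only [List.map_append, List.flatten_append, List.map_map]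
  congr 2
  · refine congrArg List.flatten (List.map_congr_left ?_)
    intro i hi
    simp only [Function.comp_apply]
    rw [rotate_take t i (le_of_lt (List.mem_range.mp hi))]
  · refine congrArg List.flatten (List.map_congr_left ?_)
    intro i hi
    simp only [Function.comp_apply]
    rw [rotate_drop t i (le_of_lt (List.mem_range.mp hi))]
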